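-- pv_equiv track=rewrite | github.com/thcharara/cot-faithfulness | study1_corpus/scripts/study1_qa_traces.py | detect_repetition_loose
-- ===== SOURCE A (Python) =====
-- def detect_repetition_loose(text, min_len=50, min_repeats=3):
--     """Looser repetition detection for confound analysis (same algo, lower thresholds)."""
--     if not text or len(text) < min_len * min_repeats:
--         return []
--     found = []
--     step = max(1, len(text) // 500)
--     seen = {}
--     for start in range(0, len(text) - min_len, step):
--         substr = text[start:start + min_len]
--         if substr in seen:
--             seen[substr] += 1
--         else:
--             count = text.count(substr)
--             seen[substr] = count
--             if count >= min_repeats: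
--                 already = False
--                 for prev, _ in found:
--                     if prev in substr or substr in prev:
--                         already = True
--                         break
--                 if not already:
--                     found.append((substr[:80], count))
--     return found
-- ===== SOURCE B (Python) =====
-- def detect_repetition_loose(text, min_len=50, min_repeats=3):
--     """Greedy select-and-eliminate: dedup sampled windows up front, then repeatedly
--     take the first eligible candidate and prune everything overlapping it."""
--     if not text or len(text) < min_len * min_repeats:
--         return []
--     step = max(1, len(text) // 500)
--     windows = [text[s:s + min_len] for s in range(0, len(text) - min_len, step)]
--     pool = [(w, text.count(w)) for w in dict.fromkeys(windows)]
--     pool = [(w, c) for w, c in pool if c >= min_repeats]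
--     out = []
--     while pool:
--         w, c = pool[0]
--         p = w[:80]
--         out.append((p, c))
--         pool = [(v, d) for v, d in pool[1:] if p not in v and v not in p]
--     return out
-- ===== Notes on version B (the rewrite author's own statement) =====
-- stated objective: alternative
-- what changed: A scans once, memoizing counts in a dict and checking each new window against the growing accepted list; B first materializes the deduped window list (dict.fromkeys) with counts and threshold-filters it, then runs a greedy select-and-eliminate: repeatedly accept the head candidate and prune every remaining candidate that overlaps it, so no accepted-list containment scan exists.
import Mathlib
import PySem

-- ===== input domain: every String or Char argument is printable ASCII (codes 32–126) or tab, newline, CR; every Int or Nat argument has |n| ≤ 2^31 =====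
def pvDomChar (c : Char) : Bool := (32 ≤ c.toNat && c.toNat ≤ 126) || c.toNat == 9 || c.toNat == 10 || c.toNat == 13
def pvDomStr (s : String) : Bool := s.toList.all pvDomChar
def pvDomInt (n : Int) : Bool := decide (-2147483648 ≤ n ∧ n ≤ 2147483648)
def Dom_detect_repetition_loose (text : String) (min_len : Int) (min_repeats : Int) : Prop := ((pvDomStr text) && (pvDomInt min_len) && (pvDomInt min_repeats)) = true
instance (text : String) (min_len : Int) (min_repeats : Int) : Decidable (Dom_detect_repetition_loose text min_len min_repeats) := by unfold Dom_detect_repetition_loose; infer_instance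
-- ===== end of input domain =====

-- B replaces A's single memoizing scan by: dedup sampled windows with counts, threshold-filter, then greedy select-and-eliminate; same results, no speed claim.


-- ===== PORT A =====
-- A-side helper: the body of A's single loop (state = (found, seen))
def aStep (text : String) (min_len : Int) (min_repeats : Int)
    (st : List (String × Int) × PySem.Dict String Int) (start : Int) :
    List (String × Int) × PySem.Dict String Int :=
  let substr := PySem.Str.slice text (some start) (some (start + min_len))
  if st.2.contains substr then
    (st.1, st.2.modify substr 0 (· + 1))
  else
    let count : Int := PySem.Str.count text substr
    let seen := st.2.insert substr count
    if min_repeats ≤ count then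
      let already := st.1.any (fun prev => PySem.Str.isIn prev.1 substr || PySem.Str.isIn substr prev.1)
      if already then (st.1, seen)
      else (st.1 ++ [(PySem.Str.slice substr none (some 80), count)], seen)
    else (st.1, seen)

def detect_repetition_loose (text : String) (min_len : Int) (min_repeats : Int) : List (String × Int) :=
  if text = "" ∨ (PySem.Str.len text : Int) < min_len * min_repeats then []
  else
    let n : Int := PySem.Str.len text
    let step : Int := max 1 (PySem.Int.floordiv n 500)
    ((PySem.List.pyRange 0 (n - min_len) step).foldl
      (aStep text min_len min_repeats) ([], PySem.Dict.empty)).1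

-- ===== PORT B =====
-- B-side helper: the while loop 'accept head, prune every remaining candidate overlapping it'
def bPick : List (String × Int) → List (String × Int)
  | [] => []
  | (w, c) :: rest =>
    let p := PySem.Str.slice w none (some 80)
    (p, c) :: bPick (rest.filter (fun v => !(PySem.Str.isIn p v.1 || PySem.Str.isIn v.1 p)))
  termination_by l => l.length
  decreasing_by
    simp only [List.length_unattach]
    exact Nat.lt_succ_of_le (le_trans (List.length_filter_le _ _) (by simp))

def detect_repetition_loose_alt (text : String) (min_len : Int) (min_repeats : Int) : List (String × Int) :=
  if text = "" ∨ (PySem.Str.len text : Int) < min_len * min_repeats then []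
  else
    let n : Int := PySem.Str.len text
    let step : Int := max 1 (PySem.Int.floordiv n 500)
    let windows := (PySem.List.pyRange 0 (n - min_len) step).map
        (fun s => PySem.Str.slice text (some s) (some (s + min_len)))
    let pool := (PySem.List.dedup windows).map (fun w => (w, (PySem.Str.count text w : Int)))
    bPick (pool.filter (fun wc => decide (min_repeats ≤ wc.2)))

-- ===== PRECONDITION & SPEC =====
def Spec_detect_repetition_loose (text : String) (min_len : Int) (min_repeats : Int) (out : List (String × Int)) : Prop := out = detect_repetition_loose_alt text min_len min_repeats
instance (text : String) (min_len : Int) (min_repeats : Int) (out : List (String × Int)) : Decidable (Spec_detect_repetition_loose text min_len min_repeats out) := by unfold Spec_detect_repetition_loose; infer_instance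

-- ===== CLAIM (what is proved, stated in full; the proofs are below) =====
def Claim_equal_detect_repetition_loose : Prop := ∀ (text : String) (min_len : Int) (min_repeats : Int), Dom_detect_repetition_loose text min_len min_repeats → Spec_detect_repetition_loose text min_len min_repeats (detect_repetition_loose text min_len min_repeats)

-- ===== LEMMAS AND PROOFS =====

-- proof-only helpers: A's loop split into 'collect distinct candidates' (colStep) and
-- 'check against accepted' (altAccept), and ordered dedup relative to an already-seen set
def altAccept (min_repeats : Int) (found : List (String × Int)) (cand : String × Int) : List (String × Int) :=
  if decide (min_repeats ≤ cand.2) &&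
      !(found.any (fun prev => PySem.Str.isIn prev.1 cand.1 || PySem.Str.isIn cand.1 prev.1)) then
    found ++ [(PySem.Str.slice cand.1 none (some 80), cand.2)]
  else found

def colStep (text : String) (min_len : Int)
    (st : List (String × Int) × PySem.Set String) (start : Int) :
    List (String × Int) × PySem.Set String :=
  let substr := PySem.Str.slice text (some start) (some (start + min_len))
  if st.2.contains substr then st
  else (st.1 ++ [(substr, (PySem.Str.count text substr : Int))], st.2.add substr)

def dedupFrom (k : PySem.Set String) : List String → List String
  | [] => []
  | w :: ws => if k.contains w then dedupFrom k ws else w :: dedupFrom (k.add w) ws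

-- unfolding equations for the well-founded bPick
theorem bPick_nil : bPick [] = [] := by rw [bPick.eq_def]

theorem bPick_cons (w : String) (c : Int) (t : List (String × Int)) :
    bPick ((w, c) :: t)
      = (PySem.Str.slice w none (some 80), c) ::
        bPick (t.filter (fun v => !(PySem.Str.isIn (PySem.Str.slice w none (some 80)) v.1 ||
            PySem.Str.isIn v.1 (PySem.Str.slice w none (some 80))))) := by
  rw [bPick.eq_def]

theorem set_contains_add (s : PySem.Set String) (x y : String) :
    (s.add x).contains y = (y == x || s.contains y) := by
  by_cases hx : x ∈ s
  · by_cases hy : y = x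
    · subst hy; simp [PySem.Set.add, PySem.Set.contains, hx]
    · simp [PySem.Set.add, PySem.Set.contains, hx, hy]
  · by_cases hy : y = x
    · subst hy; simp [PySem.Set.add, PySem.Set.contains, hx]
    · simp [PySem.Set.add, PySem.Set.contains, hx, hy]

theorem aStep_seen (text : String) (min_len min_repeats x : Int)
    (f : List (String × Int)) (s : PySem.Dict String Int)
    (h : s.contains (PySem.Str.slice text (some x) (some (x + min_len))) = true) :
    aStep text min_len min_repeats (f, s) x
      = (f, s.modify (PySem.Str.slice text (some x) (some (x + min_len))) 0 (· + 1)) := by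
  simp only [aStep, h, if_true]

-- on a fresh substring, A's loop body does exactly one 'altAccept' step and records the count
theorem aStep_new (text : String) (min_len min_repeats x : Int)
    (f : List (String × Int)) (s : PySem.Dict String Int)
    (h : s.contains (PySem.Str.slice text (some x) (some (x + min_len))) = false) :
    aStep text min_len min_repeats (f, s) x
      = (altAccept min_repeats f
            (PySem.Str.slice text (some x) (some (x + min_len)),
             (PySem.Str.count text (PySem.Str.slice text (some x) (some (x + min_len))) : Int)),
         s.insert (PySem.Str.slice text (some x) (some (x + min_len)))
           (PySem.Str.count text (PySem.Str.slice text (some x) (some (x + min_len))) : Int)) := by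
  simp only [aStep, altAccept, h, Bool.false_eq_true, if_false]
  by_cases h1 : min_repeats ≤ ((PySem.Str.count text (PySem.Str.slice text (some x) (some (x + min_len)))) : Int)
  · rw [if_pos h1]
    cases hb : (f.any fun prev =>
        PySem.Str.isIn prev.1 (PySem.Str.slice text (some x) (some (x + min_len))) ||
          PySem.Str.isIn (PySem.Str.slice text (some x) (some (x + min_len))) prev.1)
    · simp only [Bool.not_false, Bool.and_true, decide_eq_true_eq, Bool.false_eq_true, if_false]
      rw [if_pos h1]
    · simp only [Bool.not_true, Bool.and_false, Bool.false_eq_true, if_false, if_true]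
  · rw [if_neg h1]
    simp only [Bool.and_eq_true, decide_eq_true_eq]
    rw [if_neg (fun hc => h1 hc.1)]

theorem colStep_seen (text : String) (min_len x : Int)
    (c : List (String × Int)) (k : PySem.Set String)
    (hk : k.contains (PySem.Str.slice text (some x) (some (x + min_len))) = true) :
    colStep text min_len (c, k) x = (c, k) := by
  simp only [colStep, hk, if_true]

theorem colStep_new (text : String) (min_len x : Int)
    (c : List (String × Int)) (k : PySem.Set String)
    (hk : k.contains (PySem.Str.slice text (some x) (some (x + min_len))) = false) :
    colStep text min_len (c, k) x
      = (c ++ [(PySem.Str.slice text (some x) (some (x + min_len)),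
                (PySem.Str.count text (PySem.Str.slice text (some x) (some (x + min_len))) : Int))],
         k.add (PySem.Str.slice text (some x) (some (x + min_len)))) := by
  simp only [colStep, hk, Bool.false_eq_true, if_false]

-- loop invariant: A's running 'found' is the altAccept fold of the candidates collected so far,
-- and A's 'seen' keys agree with the collector's set
theorem loop_eq (text : String) (min_len min_repeats : Int) :
    ∀ (xs : List Int) (f : List (String × Int)) (s : PySem.Dict String Int)
      (c : List (String × Int)) (k : PySem.Set String),
    (∀ t, s.contains t = k.contains t) →
    f = c.foldl (altAccept min_repeats) [] →
    (xs.foldl (aStep text min_len min_repeats) (f, s)).1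
      = ((xs.foldl (colStep text min_len) (c, k)).1).foldl (altAccept min_repeats) []
  | [], f, s, c, k, hsk, hf => by simpa using hf
  | x :: xs, f, s, c, k, hsk, hf => by
    simp only [List.foldl_cons]
    by_cases h : s.contains (PySem.Str.slice text (some x) (some (x + min_len))) = true
    · have hk : k.contains (PySem.Str.slice text (some x) (some (x + min_len))) = true := by
        rw [← hsk]; exact h
      rw [aStep_seen text min_len min_repeats x f s h, colStep_seen text min_len x c k hk]
      exact loop_eq text min_len min_repeats xs f _ c k
        (by
          intro t
          rw [PySem.Dict.contains_modify, hsk]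
          by_cases ht : t = PySem.Str.slice text (some x) (some (x + min_len))
          · subst ht; rw [hk]; simp
          · simp [ht]) hf
    · have hfalse : s.contains (PySem.Str.slice text (some x) (some (x + min_len))) = false :=
        eq_false_of_ne_true h
      have hk : k.contains (PySem.Str.slice text (some x) (some (x + min_len))) = false := by
        rw [← hsk]; exact hfalse
      rw [aStep_new text min_len min_repeats x f s hfalse, colStep_new text min_len x c k hk]
      exact loop_eq text min_len min_repeats xs _ _ _ _
        (by intro t; rw [PySem.Dict.contains_insert, set_contains_add, hsk])
        (by rw [List.foldl_append, ← hf, List.foldl_cons, List.foldl_nil])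

-- the collector over start positions is dedupFrom over the window list, paired with counts
theorem collect_eq (text : String) (min_len : Int) :
    ∀ (xs : List Int) (c : List (String × Int)) (k : PySem.Set String),
    (xs.foldl (colStep text min_len) (c, k)).1
      = c ++ (dedupFrom k (xs.map (fun s => PySem.Str.slice text (some s) (some (s + min_len))))).map
          (fun w => (w, (PySem.Str.count text w : Int)))
  | [], c, k => by simp [dedupFrom]
  | x :: xs, c, k => by
    simp only [List.foldl_cons, List.map_cons, dedupFrom]
    by_cases hk : k.contains (PySem.Str.slice text (some x) (some (x + min_len))) = true
    · rw [colStep_seen text min_len x c k hk, if_pos hk, collect_eq text min_len xs c k]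
    · have hk' : k.contains (PySem.Str.slice text (some x) (some (x + min_len))) = false :=
        eq_false_of_ne_true hk
      rw [colStep_new text min_len x c k hk', if_neg hk, collect_eq text min_len xs _ _]
      simp [List.append_assoc]

-- dedupFrom from the empty set is Python's dict.fromkeys dedup
theorem dedupFrom_empty (l : List String) : dedupFrom (PySem.Set.ofList []) l = PySem.List.dedup l := by
  have key : ∀ (l : List String) (k : PySem.Set String),
      l.foldl PySem.Set.add k = k ++ dedupFrom k l := by
    intro l
    induction l with
    | nil => intro k; simp [dedupFrom]
    | cons x xs ih =>
      intro k
      simp only [List.foldl_cons, dedupFrom]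
      by_cases hk : k.contains x = true
      · have hx : x ∈ k := by simpa [PySem.Set.contains] using hk
        rw [if_pos hk]
        simpa [PySem.Set.add, hx] using ih k
      · have hx : x ∉ k := by simpa [PySem.Set.contains] using hk
        rw [if_neg hk]
        have : PySem.Set.add k x = k ++ [x] := by simp [PySem.Set.add, hx]
        rw [this]
        rw [show xs.foldl PySem.Set.add (k ++ [x]) = (k ++ [x]) ++ dedupFrom (k ++ [x]) xs from ih _]
        simp
  have h := key l (PySem.Set.ofList [])
  rw [PySem.List.dedup_eq_ofList, PySem.Set.ofList_eq_foldl]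
  simpa [PySem.Set.ofList] using h.symm

-- greedy select-and-eliminate equals 'check each candidate against the accepted list'
theorem greedy_eq (min_repeats : Int) :
    ∀ (l f : List (String × Int)),
    l.foldl (altAccept min_repeats) f
      = f ++ bPick (l.filter (fun wc => decide (min_repeats ≤ wc.2) &&
          !(f.any (fun prev => PySem.Str.isIn prev.1 wc.1 || PySem.Str.isIn wc.1 prev.1))))
  | [], f => by simp [bPick_nil]
  | (w, c) :: t, f => by
    simp only [List.foldl_cons, List.filter_cons]
    by_cases hpass : (decide (min_repeats ≤ c) &&
        !(f.any (fun prev => PySem.Str.isIn prev.1 w || PySem.Str.isIn w prev.1))) = true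
    · have hacc : altAccept min_repeats f (w, c)
          = f ++ [(PySem.Str.slice w none (some 80), c)] := by
        simp only [altAccept]; rw [if_pos hpass]
      rw [hacc, if_pos hpass, greedy_eq min_repeats t (f ++ [(PySem.Str.slice w none (some 80), c)])]
      have hfilt :
          t.filter (fun wc => decide (min_repeats ≤ wc.2) &&
              !((f ++ [(PySem.Str.slice w none (some 80), c)]).any
                 (fun prev => PySem.Str.isIn prev.1 wc.1 || PySem.Str.isIn wc.1 prev.1)))
            = (t.filter (fun wc => decide (min_repeats ≤ wc.2) &&
                !(f.any (fun prev => PySem.Str.isIn prev.1 wc.1 || PySem.Str.isIn wc.1 prev.1)))).filter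
                (fun v => !(PySem.Str.isIn (PySem.Str.slice w none (some 80)) v.1 ||
                            PySem.Str.isIn v.1 (PySem.Str.slice w none (some 80)))) := by
        rw [List.filter_filter]
        apply List.filter_congr
        intro a _
        simp only [List.any_append, List.any_cons, List.any_nil, Bool.or_false, Bool.not_or]
        cases decide (min_repeats ≤ a.2) <;>
          cases f.any (fun prev => PySem.Str.isIn prev.1 a.1 || PySem.Str.isIn a.1 prev.1) <;>
          cases PySem.Str.isIn (PySem.Str.slice w none (some 80)) a.1 <;>
          cases PySem.Str.isIn a.1 (PySem.Str.slice w none (some 80)) <;> rfl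
      rw [bPick_cons, hfilt, List.append_assoc]
      rfl
    · have hacc : altAccept min_repeats f (w, c) = f := by
        simp only [altAccept]; rw [if_neg hpass]
      rw [hacc, if_neg hpass, greedy_eq min_repeats t f]

-- ===== VERDICT (by name: the statement is the Claim_ definition above) =====
theorem detect_repetition_loose_spec : Claim_equal_detect_repetition_loose := by
  intro text min_len min_repeats _
  unfold Spec_detect_repetition_loose detect_repetition_loose detect_repetition_loose_alt
  split_ifs with h
  · rfl
  · rw [loop_eq text min_len min_repeats _ [] PySem.Dict.empty [] (PySem.Set.ofList [])
      (fun t => by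
        simp [PySem.Dict.empty, PySem.Dict.contains, PySem.Set.ofList, PySem.Set.contains])
      rfl]
    rw [collect_eq text min_len _ [] (PySem.Set.ofList []), List.nil_append, dedupFrom_empty]
    rw [greedy_eq min_repeats _ []]
    simp only [List.any_nil, Bool.not_false, Bool.and_true, List.nil_append]
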